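-- pv_equiv track=rewrite | github.com/BigData2025-Rev/BigData | CodingChallengDec19/imocha2.py | elementRemoval
-- ===== SOURCE A (Python) =====
-- def elementRemoval(N, K, A):
--
--     # this is default OUTPUT. You can change it.
--
--     result = 0
--
--     # write your Logic here:
--
--     f = {}
--
--     for value in A:
--         if value in f:
--             f[value] += 1
--         else:
--             f[value] = 1
--
--     for key in f.keys():
--         result += f[key] % K
--     return result
-- ===== SOURCE B (Python) =====
-- def elementRemoval(N, K, A):
--     # Sort a copy and sum count % K per run of equal values (single grouped pass,
--     # no frequency dictionary). Return value identical to A for K != 0.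
--     s = sorted(A)
--     if not s:
--         return 0
--     result = 0
--     prev = s[0]
--     count = 1
--     for x in s[1:]:
--         if x == prev:
--             count += 1
--         else:
--             result += count % K
--             prev = x
--             count = 1
--     return result + count % K
-- ===== Notes on version B (the rewrite author's own statement) =====
-- stated objective: alternative
-- what changed: Replaces A's frequency dictionary (build dict, then iterate keys) by sort-then-group: walk sorted(A) once with a run-length counter and add count % K at each run boundary.
import Mathlib
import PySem

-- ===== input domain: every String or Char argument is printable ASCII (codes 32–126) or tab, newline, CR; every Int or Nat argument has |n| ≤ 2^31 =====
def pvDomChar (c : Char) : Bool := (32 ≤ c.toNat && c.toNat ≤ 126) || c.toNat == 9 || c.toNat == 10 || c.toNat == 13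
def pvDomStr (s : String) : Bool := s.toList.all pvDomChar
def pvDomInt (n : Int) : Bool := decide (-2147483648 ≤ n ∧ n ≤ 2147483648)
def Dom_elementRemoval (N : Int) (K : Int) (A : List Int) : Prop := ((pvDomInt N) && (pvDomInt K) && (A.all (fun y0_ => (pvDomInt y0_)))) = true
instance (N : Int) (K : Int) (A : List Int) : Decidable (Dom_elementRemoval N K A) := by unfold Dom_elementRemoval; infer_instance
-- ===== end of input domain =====

-- B replaces A's frequency dictionary by a sort-then-group single pass (alternative
-- decomposition, same return value); neither program mutates its arguments.

-- ===== PORT A =====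
def elementRemoval (N : Int) (K : Int) (A : List Int) : Int :=
  -- f = {}; for value in A: if value in f: f[value] += 1 else: f[value] = 1
  let f := A.foldl
    (fun d value =>
      if d.contains value then d.modify value 0 (· + 1) else d.insert value 1)
    (PySem.Dict.empty : PySem.Dict Int Int)
  -- for key in f.keys(): result += f[key] % K   (key ∈ f.keys, so f[key] is total: getD 0 is exact)
  f.keys.foldl (fun result key => result + PySem.Int.mod (f.getD key 0) K) 0

-- ===== PORT B =====
def altStep (K : Int) (st : Int × Int × Int) (x : Int) : Int × Int × Int :=
  -- loop body over s[1:] with state (result, prev, count)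
  if x == st.2.1 then (st.1, st.2.1, st.2.2 + 1)
  else (st.1 + PySem.Int.mod st.2.2 K, x, 1)

def elementRemoval_alt (N : Int) (K : Int) (A : List Int) : Int :=
  match PySem.List.sorted A (fun x => x) false with
  | [] => 0
  | x :: rest =>
    let st := rest.foldl (altStep K) (0, x, 1)
    st.1 + PySem.Int.mod st.2.2 K

-- ===== PRECONDITION & SPEC =====
-- Pre_ excludes exactly the inputs where Python's '% K' raises ZeroDivisionError:
-- K = 0 with a non-empty A (for A = [] the modulo is never reached and both return 0).
def Pre_elementRemoval (N : Int) (K : Int) (A : List Int) : Prop := A = [] ∨ K ≠ 0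
instance (N : Int) (K : Int) (A : List Int) : Decidable (Pre_elementRemoval N K A) := by
  unfold Pre_elementRemoval; infer_instance
def pvWitness_elementRemoval : Int × Int × List Int := (3, 2, [1, 1, 2])

def Spec_elementRemoval (N : Int) (K : Int) (A : List Int) (out : Int) : Prop := out = elementRemoval_alt N K A
instance (N : Int) (K : Int) (A : List Int) (out : Int) : Decidable (Spec_elementRemoval N K A out) := by unfold Spec_elementRemoval; infer_instance

-- ===== CLAIM (what is proved, stated in full; the proofs are below) =====
def Claim_equal_elementRemoval : Prop := ∀ (N : Int) (K : Int) (A : List Int), Dom_elementRemoval N K A → Pre_elementRemoval N K A → Spec_elementRemoval N K A (elementRemoval N K A)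

-- ===== LEMMAS AND PROOFS =====

-- A's dict-update branch equals Counter's update on every dict (insert of a fresh key IS modify).
lemma stepA_eq_modify (d : PySem.Dict Int Int) (x : Int) :
    (if d.contains x then d.modify x 0 (· + 1) else d.insert x 1)
      = d.modify x 0 (· + 1) := by
  by_cases h : d.contains x = true
  · simp [h]
  · simp only [Bool.not_eq_true] at h
    simp [h, PySem.Dict.modify, PySem.Dict.insert, PySem.Dict.getD,
      (PySem.Dict.get?_eq_none_iff_contains d x).mpr h]

-- A's value is the sum of (count in A) % K over the distinct values of A.
lemma elementRemoval_eq_sum (N K : Int) (A : List Int) :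
    elementRemoval N K A
      = ((PySem.Set.ofList A).map (fun v => PySem.Int.mod (A.count v) K)).sum := by
  simp only [elementRemoval]
  have hf : List.foldl
      (fun d value => if d.contains value then d.modify value 0 (· + 1) else d.insert value 1)
      (PySem.Dict.empty : PySem.Dict Int Int) A = PySem.Dict.counter A := by
    rw [PySem.Dict.counter_eq_foldl]
    exact PySem.List.foldl_congr_mem A _ _ _ (fun acc x _ => stepA_eq_modify acc x)
  rw [hf, PySem.List.foldl_add]
  simp only [PySem.Dict.getD_counter, PySem.Dict.keys_counter, zero_add]

-- The run-length invariant of B's loop over a sorted suffix l whose elements all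
-- dominate the current run value prev.
lemma scanB (K : Int) : ∀ (l : List Int) (res prev count : Int),
    l.Pairwise (· ≤ ·) → (∀ y ∈ l, prev ≤ y) →
    (l.foldl (altStep K) (res, prev, count)).1
        + PySem.Int.mod (l.foldl (altStep K) (res, prev, count)).2.2 K
      = res + PySem.Int.mod (count + l.count prev) K
          + ((PySem.Set.discard (PySem.Set.ofList l) prev).map
              (fun v => PySem.Int.mod (l.count v) K)).sum := by
  intro l
  induction l with
  | nil => intro res prev count _ _; simp [PySem.Set.ofList]
  | cons x t ih =>
    intro res prev count hp hge
    have hpt : t.Pairwise (· ≤ ·) := (List.pairwise_cons.mp hp).2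
    have hxt : ∀ y ∈ t, x ≤ y := (List.pairwise_cons.mp hp).1
    by_cases hx : x = prev
    · subst hx
      simp only [List.foldl_cons, altStep, beq_self_eq_true, if_true]
      rw [ih res x (count + 1) hpt hxt]
      have hset : PySem.Set.discard (PySem.Set.ofList (x :: t)) x
          = PySem.Set.discard (PySem.Set.ofList t) x := by
        rw [PySem.Set.ofList_cons]
        simp [PySem.Set.discard, List.filter_filter]
      have hmap : ∀ s : List Int, (∀ v ∈ s, v ≠ x) →
          (s.map (fun v => PySem.Int.mod (t.count v) K))
            = (s.map (fun v => PySem.Int.mod ((x :: t).count v) K)) := by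
        intro s hs
        apply List.map_congr_left
        intro v hv
        rw [List.count_cons_of_ne (fun h => hs v hv h.symm)]
      rw [hmap _ (by
        intro v hv
        rcases List.mem_filter.mp hv with ⟨_, hvne⟩
        simpa using hvne)]
      rw [← hset]
      rw [List.count_cons_self]
      push_cast
      ring_nf
    · have hprevx : prev < x := lt_of_le_of_ne (hge x (List.mem_cons_self)) (Ne.symm hx)
      have hprevt : ∀ y ∈ x :: t, prev ≠ y := by
        intro y hy
        rcases List.mem_cons.mp hy with h | h
        · subst h; exact ne_of_lt hprevx
        · exact ne_of_lt (lt_of_lt_of_le hprevx (hxt y h))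
      simp only [List.foldl_cons, altStep, beq_iff_eq, if_neg hx]
      rw [ih (res + PySem.Int.mod count K) x 1 hpt hxt]
      have hcnt0 : (x :: t).count prev = 0 := by
        rw [List.count_eq_zero]
        intro hmem; exact hprevt prev (by exact hmem) rfl
      have hnotmem : prev ∉ PySem.Set.ofList (x :: t) := by
        intro hmem
        exact hprevt prev ((PySem.Set.mem_ofList _ _).mp hmem) rfl
      have hdisc : PySem.Set.discard (PySem.Set.ofList (x :: t)) prev
          = PySem.Set.ofList (x :: t) := by
        simp only [PySem.Set.discard]
        apply List.filter_eq_self.mpr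
        intro v hv
        simp only [Bool.not_eq_true', beq_eq_false_iff_ne, ne_eq]
        intro h; subst h; exact hnotmem hv
      rw [hcnt0, hdisc, PySem.Set.ofList_cons]
      simp only [List.map_cons, List.sum_cons, List.count_cons_self]
      have hmap2 : ((PySem.Set.discard (PySem.Set.ofList t) x).map
            (fun v => PySem.Int.mod ((x :: t).count v) K))
          = ((PySem.Set.discard (PySem.Set.ofList t) x).map
            (fun v => PySem.Int.mod (t.count v) K)) := by
        apply List.map_congr_left
        intro v hv
        rcases (PySem.Set.mem_discard _ _ _).mp hv with ⟨_, hvne⟩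
        rw [List.count_cons_of_ne (fun h => hvne h.symm)]
      rw [hmap2]
      push_cast
      ring_nf

-- B's value equals the same per-distinct-value sum, taken over sorted(A).
lemma elementRemoval_alt_eq_sum (N K : Int) (A : List Int) :
    elementRemoval_alt N K A
      = ((PySem.Set.ofList (PySem.List.sorted A (fun x => x) false)).map
          (fun v => PySem.Int.mod ((PySem.List.sorted A (fun x => x) false).count v) K)).sum := by
  unfold elementRemoval_alt
  cases hs : PySem.List.sorted A (fun x => x) false with
  | nil => simp [PySem.Set.ofList]
  | cons x rest =>
    have hpair : (x :: rest).Pairwise (· ≤ ·) := by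
      have := PySem.List.sorted_pairwise A (fun x => x)
      rw [hs] at this; exact this
    have h := scanB K rest 0 x 1 (List.pairwise_cons.mp hpair).2 (List.pairwise_cons.mp hpair).1
    simp only [h, zero_add]
    rw [PySem.Set.ofList_cons]
    simp only [List.map_cons, List.sum_cons, List.count_cons_self]
    have hmap : ((PySem.Set.discard (PySem.Set.ofList rest) x).map
          (fun v => PySem.Int.mod ((x :: rest).count v) K))
        = ((PySem.Set.discard (PySem.Set.ofList rest) x).map
          (fun v => PySem.Int.mod (rest.count v) K)) := by
      apply List.map_congr_left
      intro v hv
      rcases (PySem.Set.mem_discard _ _ _).mp hv with ⟨_, hvne⟩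
      rw [List.count_cons_of_ne (fun h => hvne h.symm)]
    rw [hmap]
    push_cast
    ring_nf

-- ===== VERDICT (by name: the statement is the Claim_ definition above) =====
theorem elementRemoval_spec : Claim_equal_elementRemoval := by
  unfold Claim_equal_elementRemoval
  intro N K A _ _
  unfold Spec_elementRemoval
  rw [elementRemoval_eq_sum, elementRemoval_alt_eq_sum]
  set s := PySem.List.sorted A (fun x => x) false with hsdef
  have hperm : s.Perm A := PySem.List.sorted_perm A (fun x => x) false
  have hsetperm : (PySem.Set.ofList A).Perm (PySem.Set.ofList s) := by
    rw [List.perm_ext_iff_of_nodup (PySem.Set.nodup_ofList A) (PySem.Set.nodup_ofList s)]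
    intro v
    simp only [PySem.Set.mem_ofList]
    exact (hperm.mem_iff).symm
  have hcount : ∀ v : Int, A.count v = s.count v := fun v => (hperm.count_eq v).symm
  calc ((PySem.Set.ofList A).map (fun v => PySem.Int.mod (A.count v) K)).sum
      = ((PySem.Set.ofList A).map (fun v => PySem.Int.mod (s.count v) K)).sum := by
        apply congrArg
        apply List.map_congr_left
        intro v _; rw [hcount v]
    _ = ((PySem.Set.ofList s).map (fun v => PySem.Int.mod (s.count v) K)).sum :=
        (hsetperm.map _).sum_eq
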